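-- pv_equiv track=rewrite | github.com/Talpaa/Python | Exercises/esercizi_ripasso_settembre/tupla_dizionario.py | lista_a_dizionario
-- ===== SOURCE A (Python) =====
-- def lista_a_dizionario(tuples: list[tuple]) -> dict[str: int]:
--
--     dizio: dict[str: int] = {}
--
--     for tupla in tuples:
--
--         if tupla[0] in dizio:
--
--             dizio[tupla[0]] += tupla[1]
--
--         else:
--
--             dizio[tupla[0]] = tupla[1]
--
--     return dizio
-- ===== SOURCE B (Python) =====
-- def lista_a_dizionario(tuples: list) -> dict:
--     # Two-pass decomposition: group values by key (first-appearance order),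
--     # then reduce each group with + seeded by its first element.
--     groups: dict = {}
--     for k, v in tuples:
--         groups.setdefault(k, []).append(v)
--     result: dict = {}
--     for k, vals in groups.items():
--         acc = vals[0]
--         for v in vals[1:]:
--             acc += v
--         result[k] = acc
--     return result
-- ===== Notes on version B (the rewrite author's own statement) =====
-- stated objective: alternative
-- what changed: B replaces A's single conditional accumulate-in-place loop by a two-pass group-then-reduce decomposition: first build a dict mapping each key to the list of its values, then fold each group with + seeded by the group's first value.
import Mathlib
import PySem

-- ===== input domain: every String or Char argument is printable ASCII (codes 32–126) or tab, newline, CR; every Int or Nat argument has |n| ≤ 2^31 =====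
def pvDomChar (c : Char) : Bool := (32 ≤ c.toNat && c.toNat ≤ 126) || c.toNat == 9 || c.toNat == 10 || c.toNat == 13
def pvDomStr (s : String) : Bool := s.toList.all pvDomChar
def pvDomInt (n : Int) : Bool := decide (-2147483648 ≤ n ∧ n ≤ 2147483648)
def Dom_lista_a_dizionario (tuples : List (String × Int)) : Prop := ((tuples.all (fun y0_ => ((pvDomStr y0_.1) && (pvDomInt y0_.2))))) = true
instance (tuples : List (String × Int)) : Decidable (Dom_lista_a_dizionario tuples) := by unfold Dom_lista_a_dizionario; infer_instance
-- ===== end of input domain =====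

-- B replaces A's conditional accumulate-in-place loop by a two-pass group-then-reduce decomposition (alternative, same cost).


-- ===== PORT A =====
-- one loop: if the key is present, add into it, else set it
def lista_a_dizionario (tuples : List (String × Int)) : List (String × Int) :=
  (tuples.foldl
    (fun dizio tupla =>
      if dizio.contains tupla.1 then
        dizio.modify tupla.1 0 (· + tupla.2)      -- dizio[tupla[0]] += tupla[1]
      else
        dizio.insert tupla.1 tupla.2)             -- dizio[tupla[0]] = tupla[1]
    PySem.Dict.empty).items

-- ===== PORT B =====
-- reduce with +, seeded by the group's first value (acc = vals[0]; for v in vals[1:]: acc += v)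
def pvReduceAdd (vals : List Int) : Int :=
  (vals.drop 1).foldl (· + ·) (vals.headD 0)

def lista_a_dizionario_alt (tuples : List (String × Int)) : List (String × Int) :=
  let groups : PySem.Dict String (List Int) :=
    tuples.foldl (fun g t => g.modify t.1 [] (· ++ [t.2])) PySem.Dict.empty
  (groups.items.foldl (fun r p => r.insert p.1 (pvReduceAdd p.2)) PySem.Dict.empty).items

-- ===== PRECONDITION & SPEC =====
def Spec_lista_a_dizionario (tuples : List (String × Int)) (out : List (String × Int)) : Prop := out = lista_a_dizionario_alt tuples
instance (tuples : List (String × Int)) (out : List (String × Int)) : Decidable (Spec_lista_a_dizionario tuples out) := by unfold Spec_lista_a_dizionario; infer_instance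

-- ===== CLAIM (what is proved, stated in full; the proofs are below) =====
def Claim_equal_lista_a_dizionario : Prop := ∀ (tuples : List (String × Int)), Dom_lista_a_dizionario tuples → Spec_lista_a_dizionario tuples (lista_a_dizionario tuples)

-- ===== LEMMAS AND PROOFS =====

-- A's branch is extensionally a single modify: when the key is absent, getD gives 0 and 0 + v = v.
theorem pvStepA_eq (d : PySem.Dict String Int) (t : String × Int) :
    (if d.contains t.1 then d.modify t.1 0 (· + t.2) else d.insert t.1 t.2)
      = d.modify t.1 0 (· + t.2) := by
  by_cases h : d.contains t.1
  · simp [h]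
  · simp only [Bool.not_eq_true] at h
    simp [h, PySem.Dict.modify, PySem.Dict.getD_of_not_contains _ _ h]

-- value accumulated by A's loop at any key
theorem pvGetD_foldA (l : List (String × Int)) (d : PySem.Dict String Int) (k : String) :
    (l.foldl (fun d t => d.modify t.1 0 (· + t.2)) d).getD k 0
      = d.getD k 0 + ((l.filter (fun p => p.1 == k)).map (·.2)).sum := by
  induction l generalizing d with
  | nil => simp
  | cons p l ih =>
    simp only [List.foldl_cons, ih, PySem.Dict.getD_modify, List.filter_cons]
    by_cases h : p.1 = k
    · simp [h, add_comm, add_assoc, add_left_comm]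
    · simp [h, Ne.symm h, beq_iff_eq]

-- the seeded reduction of a group is its sum
theorem pvReduceAdd_eq_sum (l : List Int) : pvReduceAdd l = l.sum := by
  cases l with
  | nil => simp [pvReduceAdd]
  | cons a t =>
    simp only [pvReduceAdd, List.headD_cons, List.drop_one, List.tail_cons, List.sum_cons]
    induction t generalizing a with
    | nil => simp
    | cons b t ih => simp [ih, add_assoc]

-- ===== VERDICT (by name: the statement is the Claim_ definition above) =====
theorem lista_a_dizionario_spec : Claim_equal_lista_a_dizionario := by
  intro tuples _
  unfold Spec_lista_a_dizionario lista_a_dizionario lista_a_dizionario_alt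
  have hA : (tuples.foldl
      (fun dizio tupla =>
        if dizio.contains tupla.1 then dizio.modify tupla.1 0 (· + tupla.2)
        else dizio.insert tupla.1 tupla.2) PySem.Dict.empty)
      = tuples.foldl (fun d t => d.modify t.1 0 (· + t.2)) PySem.Dict.empty := by
    have hstep : (fun (d : PySem.Dict String Int) (t : String × Int) =>
        if d.contains t.1 then d.modify t.1 0 (· + t.2) else d.insert t.1 t.2)
        = fun d t => d.modify t.1 0 (· + t.2) := by
      funext d t; exact pvStepA_eq d t
    rw [hstep]
  rw [hA]
  set G := tuples.foldl (fun g t => g.modify t.1 [] (· ++ [t.2])) PySem.Dict.empty with hG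
  set D := tuples.foldl (fun d t => d.modify t.1 0 (· + t.2)) PySem.Dict.empty with hD
  have hGnodup : G.keys.Nodup := by
    rw [hG]
    exact PySem.Dict.nodup_keys_foldl_modify_key tuples (·.1) [] (fun g t l => l ++ [t.2]) _
      (by simp)
  have hDnodup : D.keys.Nodup := by
    rw [hD]
    exact PySem.Dict.nodup_keys_foldl_modify_key tuples (·.1) 0 (fun d t x => x + t.2) _
      (by simp)
  have hkeys : D.keys = G.keys := by
    rw [hD, hG,
      PySem.Dict.keys_foldl_modify_key tuples (·.1) 0 (fun d t x => x + t.2) PySem.Dict.empty,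
      PySem.Dict.keys_foldl_modify_key tuples (·.1) [] (fun g t l => l ++ [t.2]) PySem.Dict.empty]
    rfl
  -- B's second pass over G.items, whose keys are fresh and distinct for the empty result dict
  have hfresh : ∀ p ∈ G.items, (PySem.Dict.empty : PySem.Dict String Int).contains p.1 = false := by
    intro p _; simp [PySem.Dict.contains_empty]
  have hres := PySem.Dict.items_foldl_insert_fresh G.items (·.1) (fun p => pvReduceAdd p.2)
    PySem.Dict.empty hfresh hGnodup
  have hempty : (PySem.Dict.empty : PySem.Dict String Int).items = [] := rfl
  rw [hempty, List.nil_append] at hres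
  rw [hres]
  rw [PySem.Dict.items_eq_map_keys D hDnodup 0,
      PySem.Dict.items_eq_map_keys G hGnodup [], hkeys, List.map_map]
  apply List.map_congr_left
  intro k _
  simp only [Function.comp_apply]
  rw [pvReduceAdd_eq_sum, hD, hG, pvGetD_foldA,
      PySem.Dict.getD_foldl_modify_append]
  simp [PySem.Dict.getD_empty]
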